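-- pv_equiv track=rewrite | github.com/vighneshvnkt/data-ductus-challenge | ParanthesisTreePrinter.py | tabs
-- ===== SOURCE A (Python) =====
-- def tabs(count):
-- 	'''
-- 		Return String with n number of tabs
-- 		input : number of tabs needed
-- 		output : string with tabs = count
-- 	'''
-- 	emptySpaces = ''
-- 	if(count <= 0):
-- 		return emptySpaces
-- 	while(count > 0):
-- 		emptySpaces = emptySpaces + '    '
-- 		count = count - 1
-- 	return emptySpaces
-- ===== SOURCE B (Python) =====
-- def tabs(count):
--     '''
--         Return String with n number of tabs
--         input : number of tabs needed
--         output : string with tabs = count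
--     '''
--     return '    ' * count
-- ===== Notes on version B (the rewrite author's own statement) =====
-- stated objective: idiomatic
-- what changed: Replaced the guard plus accumulation while-loop with the single closed-form repetition ' ' * count (non-positive counts already yield '').
import Mathlib
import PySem

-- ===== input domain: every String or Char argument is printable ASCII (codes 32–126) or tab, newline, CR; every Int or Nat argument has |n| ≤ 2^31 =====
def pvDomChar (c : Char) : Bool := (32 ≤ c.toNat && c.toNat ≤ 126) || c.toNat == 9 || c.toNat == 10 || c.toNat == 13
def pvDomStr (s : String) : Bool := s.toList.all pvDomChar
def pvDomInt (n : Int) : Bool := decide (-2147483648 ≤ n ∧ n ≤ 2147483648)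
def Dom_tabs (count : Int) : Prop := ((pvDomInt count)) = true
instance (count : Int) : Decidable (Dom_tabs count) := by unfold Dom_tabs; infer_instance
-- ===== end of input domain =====

-- B replaces A's guard + accumulation loop with the closed-form repetition '    ' * count (idiomatic).

-- ===== PORT A =====
-- the while loop: append '    ' and decrement until count reaches 0 (fuel = the positive count)
def tabsLoop : Nat → String → String
  | 0, acc => acc
  | n + 1, acc => tabsLoop n (acc ++ "    ")

def tabs (count : Int) : String :=
  if count ≤ 0 then "" else tabsLoop count.toNat ""

-- ===== PORT B =====
-- '    ' * count : Python string repetition, '' for non-positive count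
def tabs_alt (count : Int) : String :=
  String.join (List.replicate count.toNat "    ")

-- ===== PRECONDITION & SPEC =====
def Spec_tabs (count : Int) (out : String) : Prop := out = tabs_alt count
instance (count : Int) (out : String) : Decidable (Spec_tabs count out) := by unfold Spec_tabs; infer_instance

-- ===== CLAIM (what is proved, stated in full; the proofs are below) =====
def Claim_equal_tabs : Prop := ∀ (count : Int), Dom_tabs count → Spec_tabs count (tabs count)

-- ===== LEMMAS AND PROOFS =====
theorem foldl_append_init (l : List String) (a b : String) :
    l.foldl (fun r s => r ++ s) (a ++ b) = a ++ l.foldl (fun r s => r ++ s) b := by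
  induction l generalizing b with
  | nil => simp
  | cons x xs ih => simpa [String.append_assoc] using ih (b ++ x)

theorem tabsLoop_eq_join (n : Nat) (acc : String) :
    tabsLoop n acc = acc ++ String.join (List.replicate n "    ") := by
  induction n generalizing acc with
  | zero => simp [tabsLoop, String.join]
  | succ k ih =>
    simp only [tabsLoop, ih, List.replicate_succ, String.join]
    simp [String.append_assoc]
    simpa using (foldl_append_init (List.replicate k "    ") "    " "").symm

-- ===== VERDICT (by name: the statement is the Claim_ definition above) =====
theorem tabs_spec : Claim_equal_tabs := by
  intro count _
  unfold Spec_tabs tabs tabs_alt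
  split
  · rename_i h
    have : count.toNat = 0 := Int.toNat_of_nonpos h
    simp [this, String.join]
  · simpa using tabsLoop_eq_join count.toNat ""
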